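-- pv_equiv track=rewrite | github.com/ehsanshahkakarh/otu_assembly_comparative_pipeline- | ncbi_parse/taxonomic_mapping/family_taxid_improved.py | determine_domain_from_lineage
-- ===== SOURCE A (Python) =====
-- def determine_domain_from_lineage(lineage_parts, rank_parts):
--     """Determine domain from lineage with improved logic"""
--     # First try to find explicit domain/superkingdom
--     for i, rank in enumerate(rank_parts):
--         if rank.lower().strip() in ['domain', 'superkingdom'] and i < len(lineage_parts):
--             return lineage_parts[i].strip()
--
--     # Check for viral indicators
--     viral_indicators = [
--         'viruses', 'virus', 'viral', 'viridae', 'viricota', 'viricetes',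
--         'orthornavirae', 'bamfordvirae', 'varidnaviria', 'riboviria',
--         'duplodnaviria', 'monodnaviria', 'adnaviria', 'ribozyviria'
--     ]
--
--     for part in lineage_parts:
--         if part and any(indicator in part.lower() for indicator in viral_indicators):
--             return "Viruses"
--
--     # Check for eukaryotic indicators
--     eukaryotic_indicators = [
--         'eukaryota', 'eukarya', 'fungi', 'metazoa', 'viridiplantae',
--         'stramenopiles', 'alveolata', 'rhizaria', 'excavata', 'amoebozoa',
--         'opisthokonta', 'archaeplastida'
--     ]
--
--     for part in lineage_parts:
--         if part and any(indicator in part.lower() for indicator in eukaryotic_indicators):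
--             return "Eukaryota"
--
--     # Check for archaea indicators
--     archaea_indicators = ['archaea', 'archaeal']
--     for part in lineage_parts:
--         if part and any(indicator in part.lower() for indicator in archaea_indicators):
--             return "Archaea"
--
--     # Check for bacteria indicators or cellular organisms
--     bacteria_indicators = ['bacteria', 'bacterial']
--     for part in lineage_parts:
--         if part and any(indicator in part.lower() for indicator in bacteria_indicators):
--             return "Bacteria"
--
--     # If we have cellular organisms, default to Bacteria
--     if any('cellular organisms' in part.lower() for part in lineage_parts if part):
--         return "Bacteria"
--
--     return "Unknown"
-- ===== SOURCE B (Python) =====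
-- VIRAL_INDICATORS = [
--     'viruses', 'virus', 'viral', 'viridae', 'viricota', 'viricetes',
--     'orthornavirae', 'bamfordvirae', 'varidnaviria', 'riboviria',
--     'duplodnaviria', 'monodnaviria', 'adnaviria', 'ribozyviria'
-- ]
-- EUK_INDICATORS = [
--     'eukaryota', 'eukarya', 'fungi', 'metazoa', 'viridiplantae',
--     'stramenopiles', 'alveolata', 'rhizaria', 'excavata', 'amoebozoa',
--     'opisthokonta', 'archaeplastida'
-- ]
-- ARCHAEA_INDICATORS = ['archaea', 'archaeal']
-- BACTERIA_INDICATORS = ['bacteria', 'bacterial']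
--
--
-- def determine_domain_from_lineage(lineage_parts, rank_parts):
--     """Determine domain from lineage: explicit rank hit, else one pass of flags."""
--     # Explicit domain/superkingdom rank: zip pairs rank with its lineage entry,
--     # which is exactly the i < len(lineage_parts) guard of the index loop.
--     hit = next((lp.strip() for rank, lp in zip(rank_parts, lineage_parts)
--                 if rank.lower().strip() in ('domain', 'superkingdom')), None)
--     if hit is not None:
--         return hit
--
--     found_viral = found_euk = found_arch = found_bact = found_cell = False
--     for part in lineage_parts:
--         if part:
--             low = part.lower()
--             found_viral = found_viral or any(ind in low for ind in VIRAL_INDICATORS)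
--             found_euk = found_euk or any(ind in low for ind in EUK_INDICATORS)
--             found_arch = found_arch or any(ind in low for ind in ARCHAEA_INDICATORS)
--             found_bact = found_bact or any(ind in low for ind in BACTERIA_INDICATORS)
--             found_cell = found_cell or 'cellular organisms' in low
--
--     if found_viral:
--         return "Viruses"
--     if found_euk:
--         return "Eukaryota"
--     if found_arch:
--         return "Archaea"
--     if found_bact or found_cell:
--         return "Bacteria"
--     return "Unknown"
-- ===== Notes on version B (the rewrite author's own statement) =====
-- stated objective: simpler
-- what changed: Replaces the four sequential category scans (plus a fifth generator scan) with a single pass over lineage_parts accumulating five boolean flags, decided in priority order after the loop, and replaces the indexed rank loop with a zip-based first-match search.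
import Mathlib
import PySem

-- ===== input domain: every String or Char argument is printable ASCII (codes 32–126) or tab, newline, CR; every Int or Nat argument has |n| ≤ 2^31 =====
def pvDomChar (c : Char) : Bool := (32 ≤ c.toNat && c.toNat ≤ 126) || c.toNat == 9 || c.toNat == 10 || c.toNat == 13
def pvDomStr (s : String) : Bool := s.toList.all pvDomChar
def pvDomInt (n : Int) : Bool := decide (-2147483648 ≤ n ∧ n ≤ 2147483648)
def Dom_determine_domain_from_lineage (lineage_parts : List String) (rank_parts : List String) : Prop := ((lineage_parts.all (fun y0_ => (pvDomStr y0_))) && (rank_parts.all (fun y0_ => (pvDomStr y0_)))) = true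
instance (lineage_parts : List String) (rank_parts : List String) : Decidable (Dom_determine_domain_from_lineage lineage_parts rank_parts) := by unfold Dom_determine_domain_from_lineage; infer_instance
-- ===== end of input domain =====

-- B replaces A's five sequential category scans by one flag-accumulating pass (same cost, simpler).

-- shared constant lists (module-level data of both programs)
def pvViral : List String :=
  ["viruses", "virus", "viral", "viridae", "viricota", "viricetes",
   "orthornavirae", "bamfordvirae", "varidnaviria", "riboviria",
   "duplodnaviria", "monodnaviria", "adnaviria", "ribozyviria"]
def pvEuk : List String :=
  ["eukaryota", "eukarya", "fungi", "metazoa", "viridiplantae",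
   "stramenopiles", "alveolata", "rhizaria", "excavata", "amoebozoa",
   "opisthokonta", "archaeplastida"]
def pvArch : List String := ["archaea", "archaeal"]
def pvBact : List String := ["bacteria", "bacterial"]

-- ===== PORT A =====
-- 'for i, rank in enumerate(rank_parts): if rank.lower().strip() in [...] and i < len(lineage_parts): return ...'
def pvRankLoopA (lps : List String) : List String → Nat → Option String
  | [], _ => none
  | r :: rs, i =>
    let v := PySem.Str.strip (PySem.Str.lower r)
    if (v == "domain" || v == "superkingdom") && decide (i < lps.length) then
      some (PySem.Str.strip (lps.getD i ""))
    else pvRankLoopA lps rs (i + 1)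

-- 'for part in lineage_parts: if part and any(ind in part.lower() for ind in inds): return <name>'
def pvScanA (inds : List String) : List String → Bool
  | [] => false
  | p :: ps =>
    if p ≠ "" && inds.any (fun ind => PySem.Str.isIn ind (PySem.Str.lower p)) then true
    else pvScanA inds ps

def determine_domain_from_lineage (lineage_parts : List String) (rank_parts : List String) : String :=
  match pvRankLoopA lineage_parts rank_parts 0 with
  | some s => s
  | none =>
    if pvScanA pvViral lineage_parts then "Viruses"
    else if pvScanA pvEuk lineage_parts then "Eukaryota"
    else if pvScanA pvArch lineage_parts then "Archaea"
    else if pvScanA pvBact lineage_parts then "Bacteria"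
    else if lineage_parts.any (fun p => p ≠ "" && PySem.Str.isIn "cellular organisms" (PySem.Str.lower p)) then "Bacteria"
    else "Unknown"

-- ===== PORT B =====
-- 'next((lp.strip() for rank, lp in zip(rank_parts, lineage_parts) if ...), None)'
def pvRankHitB (lps rps : List String) : Option String :=
  (rps.zip lps).findSome? (fun pr =>
    let v := PySem.Str.strip (PySem.Str.lower pr.1)
    if v == "domain" || v == "superkingdom" then some (PySem.Str.strip pr.2) else none)

-- the body of B's single flag-accumulating loop
def pvFlagStep (acc : Bool × Bool × Bool × Bool × Bool) (p : String) : Bool × Bool × Bool × Bool × Bool :=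
  if p = "" then acc else
  let low := PySem.Str.lower p
  (acc.1 || pvViral.any (fun ind => PySem.Str.isIn ind low),
   acc.2.1 || pvEuk.any (fun ind => PySem.Str.isIn ind low),
   acc.2.2.1 || pvArch.any (fun ind => PySem.Str.isIn ind low),
   acc.2.2.2.1 || pvBact.any (fun ind => PySem.Str.isIn ind low),
   acc.2.2.2.2 || PySem.Str.isIn "cellular organisms" low)

def determine_domain_from_lineage_alt (lineage_parts : List String) (rank_parts : List String) : String :=
  match pvRankHitB lineage_parts rank_parts with
  | some s => s
  | none =>
    let f := lineage_parts.foldl pvFlagStep (false, false, false, false, false)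
    if f.1 then "Viruses"
    else if f.2.1 then "Eukaryota"
    else if f.2.2.1 then "Archaea"
    else if f.2.2.2.1 || f.2.2.2.2 then "Bacteria"
    else "Unknown"

-- ===== PRECONDITION & SPEC =====
def Spec_determine_domain_from_lineage (lineage_parts : List String) (rank_parts : List String) (out : String) : Prop := out = determine_domain_from_lineage_alt lineage_parts rank_parts
instance (lineage_parts : List String) (rank_parts : List String) (out : String) : Decidable (Spec_determine_domain_from_lineage lineage_parts rank_parts out) := by unfold Spec_determine_domain_from_lineage; infer_instance

-- ===== CLAIM (what is proved, stated in full; the proofs are below) =====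
def Claim_equal_determine_domain_from_lineage : Prop := ∀ (lineage_parts : List String) (rank_parts : List String), Dom_determine_domain_from_lineage lineage_parts rank_parts → Spec_determine_domain_from_lineage lineage_parts rank_parts (determine_domain_from_lineage lineage_parts rank_parts)

-- ===== LEMMAS AND PROOFS =====

-- A's indexed rank loop equals B's zip-based first-match search.
lemma rankLoop_eq_hit (rps : List String) : ∀ (lps : List String) (i : Nat),
    pvRankLoopA lps rps i =
      ((rps.zip (lps.drop i)).findSome? (fun pr =>
        let v := PySem.Str.strip (PySem.Str.lower pr.1)
        if v == "domain" || v == "superkingdom" then some (PySem.Str.strip pr.2) else none)) := by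
  induction rps with
  | nil => intro lps i; simp [pvRankLoopA]
  | cons r rs ih =>
    intro lps i
    by_cases hi : i < lps.length
    · rw [List.drop_eq_getElem_cons hi]
      simp only [pvRankLoopA, List.zip_cons_cons, List.findSome?_cons]
      cases hc : (PySem.Str.strip (PySem.Str.lower r) == "domain"
          || PySem.Str.strip (PySem.Str.lower r) == "superkingdom") with
      | true =>
        rw [if_pos (by simp [hi]), if_pos rfl, List.getD_eq_getElem lps "" hi]
      | false =>
        rw [if_neg (by simp), if_neg (by simp), ih lps (i + 1)]
    · have hdrop : lps.drop i = [] := List.drop_eq_nil_of_le (by omega)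
      have hdrop' : lps.drop (i + 1) = [] := List.drop_eq_nil_of_le (by omega)
      rw [hdrop]
      simp only [pvRankLoopA, List.zip_nil_right, List.findSome?_nil]
      rw [if_neg (by simp [hi]), ih lps (i + 1), hdrop']
      simp

-- A's early-return scan is List.any of its per-part test.
lemma scanA_eq_any (inds : List String) : ∀ (lps : List String),
    pvScanA inds lps = lps.any (fun p => p ≠ "" && inds.any (fun ind => PySem.Str.isIn ind (PySem.Str.lower p))) := by
  intro lps
  induction lps with
  | nil => rfl
  | cons p ps ih =>
    simp only [pvScanA, List.any_cons]
    cases hc : (p ≠ "" && inds.any (fun ind => PySem.Str.isIn ind (PySem.Str.lower p))) with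
    | true => rw [if_pos rfl, Bool.true_or]
    | false => rw [if_neg (by simp), Bool.false_or, ih]

-- B's flag fold computes the five List.any values, or-ed onto the accumulator.
lemma foldl_flags (lps : List String) : ∀ (a b c d e : Bool),
    lps.foldl pvFlagStep (a, b, c, d, e) =
      (a || lps.any (fun p => p ≠ "" && pvViral.any (fun ind => PySem.Str.isIn ind (PySem.Str.lower p))),
       b || lps.any (fun p => p ≠ "" && pvEuk.any (fun ind => PySem.Str.isIn ind (PySem.Str.lower p))),
       c || lps.any (fun p => p ≠ "" && pvArch.any (fun ind => PySem.Str.isIn ind (PySem.Str.lower p))),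
       d || lps.any (fun p => p ≠ "" && pvBact.any (fun ind => PySem.Str.isIn ind (PySem.Str.lower p))),
       e || lps.any (fun p => p ≠ "" && PySem.Str.isIn "cellular organisms" (PySem.Str.lower p))) := by
  induction lps with
  | nil => intro a b c d e; simp
  | cons p ps ih =>
    intro a b c d e
    by_cases hp : p = ""
    · simp only [List.foldl_cons, pvFlagStep, if_pos hp, ih, List.any_cons]
      simp [hp]
    · simp only [List.foldl_cons, pvFlagStep, if_neg hp, ih, List.any_cons]
      have hne : (decide (p ≠ "")) = true := by simp [hp]
      simp only [hne, Bool.true_and, Bool.or_assoc]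

-- both priority chains over the same five booleans agree
lemma chain_eq (v e ar b c : Bool) :
    (if v then "Viruses" else if e then "Eukaryota" else if ar then "Archaea"
      else if b then "Bacteria" else if c then "Bacteria" else "Unknown")
    = (if v then "Viruses" else if e then "Eukaryota" else if ar then "Archaea"
      else if b || c then "Bacteria" else "Unknown") := by
  cases v <;> cases e <;> cases ar <;> cases b <;> cases c <;> rfl

-- ===== VERDICT (by name: the statement is the Claim_ definition above) =====
theorem determine_domain_from_lineage_spec : Claim_equal_determine_domain_from_lineage := by
  intro lps rps _
  show determine_domain_from_lineage lps rps = determine_domain_from_lineage_alt lps rps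
  unfold determine_domain_from_lineage determine_domain_from_lineage_alt pvRankHitB
  rw [show rps.zip lps = rps.zip (lps.drop 0) from by rw [List.drop_zero], ← rankLoop_eq_hit]
  cases pvRankLoopA lps rps 0 with
  | some s => rfl
  | none =>
    simp only [foldl_flags, scanA_eq_any]
    exact chain_eq _ _ _ _ _
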